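-- pv_equiv track=rewrite | github.com/sissl0/SideChannelAttacks | 06/kocherAttack.py | simulate_get_s_before_bit
-- ===== SOURCE A (Python) =====
-- from typing import List
--
-- N = 10961
--
-- def simulate_get_s_before_bit(M: int, bits: List[int]) -> int:
--     """
--     Simulate the algorithm with given bits and return s value
--     AFTER processing all bits (which is s BEFORE the next bit).
--     """
--     s = 1
--     for b in bits:
--         if b == 1:
--             r = (s * M) % N
--         else:
--             r = s
--         s = (r * r) % N
--     return s
-- ===== SOURCE B (Python) =====
-- from typing import List
--
-- N = 10961
--
-- def simulate_get_s_before_bit(M: int, bits: List[int]) -> int: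
--     """Fold the bits into an integer exponent, then do one modular exponentiation.
--
--     The loop in the original is multiply-then-square, so after processing the
--     bit string with value X the accumulated exponent is exactly 2*X.
--     """
--     X = 0
--     for b in bits:
--         X = 2 * X + (1 if b == 1 else 0)
--     return pow(M, 2 * X, N)
-- ===== Notes on version B (the rewrite author's own statement) =====
-- stated objective: idiomatic
-- what changed: Replaced the per-bit square-and-multiply simulation (two modular multiplications per bit) with folding the bits into an integer exponent X and a single pow(M, 2*X, N) call.
import Mathlib
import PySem

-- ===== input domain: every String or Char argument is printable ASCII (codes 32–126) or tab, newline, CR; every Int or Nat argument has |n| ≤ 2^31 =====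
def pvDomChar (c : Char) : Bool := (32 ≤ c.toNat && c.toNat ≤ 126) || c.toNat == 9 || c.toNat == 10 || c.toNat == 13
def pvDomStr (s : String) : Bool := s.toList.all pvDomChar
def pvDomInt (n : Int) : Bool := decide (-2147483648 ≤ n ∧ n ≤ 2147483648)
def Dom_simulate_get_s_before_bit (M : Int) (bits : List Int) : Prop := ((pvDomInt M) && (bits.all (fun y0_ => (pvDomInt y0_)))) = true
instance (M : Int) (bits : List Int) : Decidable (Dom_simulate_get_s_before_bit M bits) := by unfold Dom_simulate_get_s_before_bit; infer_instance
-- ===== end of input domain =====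

-- B folds the bit list into one exponent and makes a single pow(M, 2*X, N) call: idiomatic, one modular exponentiation instead of the per-bit simulation.

-- ===== PORT A =====
-- the loop: s = 1; for b: r = (s*M)%N if b==1 else s; s = (r*r)%N
def simulate_get_s_before_bit (M : Int) (bits : List Int) : Int :=
  bits.foldl (fun s b =>
    let r := if b = 1 then PySem.Int.mod (s * M) 10961 else s
    PySem.Int.mod (r * r) 10961) 1

-- ===== PORT B =====
-- X = 0; for b: X = 2*X + (1 if b == 1 else 0); return pow(M, 2*X, N)
def simulate_get_s_before_bit_alt (M : Int) (bits : List Int) : Int :=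
  let X := bits.foldl (fun x b => 2 * x + (if b = 1 then 1 else 0)) (0 : Int)
  PySem.Int.powMod M (2 * X).toNat 10961

-- ===== PRECONDITION & SPEC =====
def Spec_simulate_get_s_before_bit (M : Int) (bits : List Int) (out : Int) : Prop := out = simulate_get_s_before_bit_alt M bits
instance (M : Int) (bits : List Int) (out : Int) : Decidable (Spec_simulate_get_s_before_bit M bits out) := by unfold Spec_simulate_get_s_before_bit; infer_instance

-- ===== CLAIM (what is proved, stated in full; the proofs are below) =====
def Claim_equal_simulate_get_s_before_bit : Prop := ∀ (M : Int) (bits : List Int), Dom_simulate_get_s_before_bit M bits → Spec_simulate_get_s_before_bit M bits (simulate_get_s_before_bit M bits)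

-- ===== LEMMAS AND PROOFS =====

-- Nat-valued version of B's exponent fold, for the induction
def pvExp (bits : List Int) (x : Nat) : Nat :=
  bits.foldl (fun x b => 2 * x + (if b = 1 then 1 else 0)) x

theorem pvExp_int (bits : List Int) (x : Nat) :
    bits.foldl (fun x b => 2 * x + (if b = 1 then 1 else 0)) (x : Int) = (pvExp bits x : Int) := by
  induction bits generalizing x with
  | nil => simp [pvExp]
  | cons b bs ih =>
    simp only [List.foldl_cons, pvExp]
    have : (2 * (x : Int) + (if b = 1 then 1 else 0)) = ((2 * x + (if b = 1 then 1 else 0) : Nat) : Int) := by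
      split <;> push_cast <;> ring
    rw [this, ih]
    rfl

-- modular-arithmetic helpers: drop an inner % under a product
theorem pvmul_l (a b n : Int) : (a % n) * b % n = a * b % n := by
  conv_rhs => rw [Int.mul_emod]
  rw [Int.mul_emod (a % n) b, Int.emod_emod_of_dvd _ dvd_rfl]

theorem pvmul_r (a b n : Int) : a * (b % n) % n = a * b % n := by
  conv_rhs => rw [Int.mul_emod]
  rw [Int.mul_emod a (b % n), Int.emod_emod_of_dvd _ dvd_rfl]

-- loop invariant: if s = M^(2x) % N then the A-loop yields M^(2·pvExp bits x) % N
theorem pvLoop (M : Int) (bits : List Int) (x : Nat) (s : Int)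
    (hs : s = M ^ (2 * x) % 10961) :
    bits.foldl (fun s b =>
      let r := if b = 1 then PySem.Int.mod (s * M) 10961 else s
      PySem.Int.mod (r * r) 10961) s
    = M ^ (2 * pvExp bits x) % 10961 := by
  induction bits generalizing x s with
  | nil => simpa [pvExp] using hs
  | cons b bs ih =>
    simp only [List.foldl_cons]
    have hpv : pvExp (b :: bs) x = pvExp bs (2 * x + (if b = 1 then 1 else 0)) := rfl
    by_cases hb : b = 1
    · rw [hpv]
      simp only [hb, reduceIte]
      refine ih (2 * x + 1) _ ?_
      simp only [PySem.Int.mod_eq_emod_of_pos (by norm_num : (0:Int) < 10961)]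
      have hsM : s * M % 10961 = M ^ (2 * x + 1) % 10961 := by
        rw [hs, pvmul_l, ← pow_succ]
      rw [hsM, pvmul_l, pvmul_r, ← pow_add]
      congr 2
      omega
    · rw [hpv]
      simp only [if_neg hb, Nat.add_zero]
      refine ih (2 * x) _ ?_
      simp only [PySem.Int.mod_eq_emod_of_pos (by norm_num : (0:Int) < 10961)]
      rw [hs, pvmul_l, pvmul_r, ← pow_add]
      congr 2
      omega

-- ===== VERDICT (by name: the statement is the Claim_ definition above) =====
theorem simulate_get_s_before_bit_spec : Claim_equal_simulate_get_s_before_bit := by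
  intro M bits _
  show simulate_get_s_before_bit M bits = simulate_get_s_before_bit_alt M bits
  unfold simulate_get_s_before_bit simulate_get_s_before_bit_alt
  have hX : bits.foldl (fun x b => 2 * x + (if b = 1 then 1 else 0)) (0 : Int) = (pvExp bits 0 : Int) := by
    simpa using pvExp_int bits 0
  rw [hX]
  have hpow : PySem.Int.powMod M (2 * (pvExp bits 0 : Int)).toNat 10961
      = M ^ (2 * pvExp bits 0) % 10961 := by
    have h2 : ((2 : Int) * (pvExp bits 0 : Int)).toNat = 2 * pvExp bits 0 := by omega
    rw [PySem.Int.powMod_eq_emod _ _ (by norm_num), h2]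
  rw [hpow]
  exact pvLoop M bits 0 1 (by simp)
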